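-- pv_equiv track=rewrite | github.com/klaukata/excercises | learning_area/python/hacker-rank/3-months-challange/week3.py | migratoryBirds
-- ===== SOURCE A (Python) =====
-- def migratoryBirds(arr):
--     d = {}
--     for bird_id in arr:
--         if bird_id not in d.keys():
--             d[bird_id] = 1
--         else:
--             d[bird_id] += 1
--     max_sightings_n = max(d.values())
--     birds_w_max_sightings = [bird_id for bird_id, sightings_n in d.items() if sightings_n == max_sightings_n]
--     return min(birds_w_max_sightings)
-- ===== SOURCE B (Python) =====
-- def migratoryBirds(arr):
--     counts = {}
--     best_count = 0
--     best_id = None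
--     for b in arr:
--         c = counts.get(b, 0) + 1
--         counts[b] = c
--         if best_count < c:
--             best_count, best_id = c, b
--         elif c == best_count and b < best_id:
--             best_id = b
--     return best_id
-- ===== Notes on version B (the rewrite author's own statement) =====
-- stated objective: alternative
-- what changed: B fuses counting and answer selection into one online pass that maintains a running (best_count, best_id) pair, instead of A's three separate passes after counting (max over values, filter ties, min over the tie list).
import Mathlib
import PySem

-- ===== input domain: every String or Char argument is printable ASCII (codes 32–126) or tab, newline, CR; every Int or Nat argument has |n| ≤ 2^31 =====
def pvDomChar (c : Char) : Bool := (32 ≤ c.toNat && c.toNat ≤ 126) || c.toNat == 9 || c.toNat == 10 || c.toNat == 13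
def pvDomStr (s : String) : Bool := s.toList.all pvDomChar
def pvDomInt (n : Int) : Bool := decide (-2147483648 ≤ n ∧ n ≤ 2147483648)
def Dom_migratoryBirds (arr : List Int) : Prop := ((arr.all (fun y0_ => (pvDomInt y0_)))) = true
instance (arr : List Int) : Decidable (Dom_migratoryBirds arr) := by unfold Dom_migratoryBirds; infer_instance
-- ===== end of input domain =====

-- B replaces A's dict-then-three-passes (max over values, filter ties, min) by one online pass
-- with a running (best_count, best_id); equal return value on every nonempty list.

-- ===== PORT A =====
-- literal port of A: build the frequency dict, then max over values, filter ties, min.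
def migratoryBirds (arr : List Int) : Int :=
  let d : PySem.Dict Int Int := arr.foldl (fun d b =>
      if d.contains b = false then d.insert b 1
      else d.insert b (d.getD b 0 + 1))   -- d[b] += 1 (key present, so getD 0 reads the stored value)
    PySem.Dict.empty
  let m : Int := (PySem.List.max? d.values (fun x => x)).getD 0   -- max(d.values()); none (ValueError) iff arr = [], excluded by Pre_
  let cands : List Int := (d.items.filter (fun p => p.2 == m)).map (·.1)
  (PySem.List.min? cands (fun x => x)).getD 0                      -- min(...); nonempty under Pre_

-- ===== PORT B =====
-- literal port of Source B: single fold carrying (counts, best_count, best_id); mbStep is the loop body.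
def mbStep (st : PySem.Dict Int Int × Int × Option Int) (b : Int) :
    PySem.Dict Int Int × Int × Option Int :=
  let c := st.1.getD b 0 + 1
  let counts := st.1.insert b c
  if st.2.1 < c then (counts, c, some b)
  else if c == st.2.1 && (match st.2.2 with | some r => decide (b < r) | none => false) then
    -- 'b < best_id': best_id = None is unreachable here (best_count = 0 < c fires first)
    (counts, st.2.1, some b)
  else (counts, st.2.1, st.2.2)

def migratoryBirds_alt (arr : List Int) : Int :=
  let st := arr.foldl mbStep (PySem.Dict.empty, 0, none)
  (st.2.2).getD 0   -- Pre_: arr ≠ [], so best_id = some _; Python returns best_id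

-- ===== PRECONDITION & SPEC =====
-- Pre_ excludes only the empty list, on which A raises ValueError (max() of an empty sequence).
def Pre_migratoryBirds (arr : List Int) : Prop := arr ≠ []
instance (arr : List Int) : Decidable (Pre_migratoryBirds arr) := by unfold Pre_migratoryBirds; infer_instance
def pvWitness_migratoryBirds : List Int := [1, 1, 2]
def Spec_migratoryBirds (arr : List Int) (out : Int) : Prop := out = migratoryBirds_alt arr
instance (arr : List Int) (out : Int) : Decidable (Spec_migratoryBirds arr out) := by unfold Spec_migratoryBirds; infer_instance

-- ===== CLAIM (what is proved, stated in full; the proofs are below) =====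
def Claim_equal_migratoryBirds : Prop := ∀ (arr : List Int), Dom_migratoryBirds arr → Pre_migratoryBirds arr → Spec_migratoryBirds arr (migratoryBirds arr)

-- ===== LEMMAS AND PROOFS =====

-- the common characterisation: r is the smallest id attaining the maximal count in arr
def IsAns (arr : List Int) (r : Int) : Prop :=
  r ∈ arr ∧ (∀ x ∈ arr, arr.count x ≤ arr.count r) ∧ (∀ x ∈ arr, arr.count x = arr.count r → r ≤ x)

theorem isAns_unique {arr : List Int} {r s : Int} (hr : IsAns arr r) (hs : IsAns arr s) : r = s := by
  obtain ⟨hrm, hrmax, hrmin⟩ := hr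
  obtain ⟨hsm, hsmax, hsmin⟩ := hs
  have h1 := hrmax s hsm
  have h2 := hsmax r hrm
  have hc : arr.count s = arr.count r := le_antisymm h1 h2
  have := hrmin s hsm hc
  have := hsmin r hrm hc.symm
  omega

theorem migratoryBirds_isAns (arr : List Int) (h : arr ≠ []) : IsAns arr (migratoryBirds arr) := by
  unfold migratoryBirds
  have hfun : (fun (d : PySem.Dict Int Int) b =>
      if d.contains b = false then d.insert b 1 else d.insert b (d.getD b 0 + 1)) =
      (fun (d : PySem.Dict Int Int) b => d.insert b (d.getD b 0 + 1)) := by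
    funext d b
    by_cases hcb : d.contains b = false
    · rw [if_pos hcb, PySem.Dict.getD_of_not_contains d 0 hcb]
      norm_num
    · rw [if_neg hcb]
  rw [hfun, PySem.Dict.foldl_insert_getD_add_one_eq_counter]
  dsimp only
  have hitems : (PySem.Dict.counter arr).items =
      (PySem.Set.ofList arr).map (fun k => (k, (arr.count k : Int))) := PySem.Dict.items_counter arr
  have hvals : (PySem.Dict.counter arr).values =
      (PySem.Set.ofList arr).map (fun k => (arr.count k : Int)) := by
    show ((PySem.Dict.counter arr).items).map (·.2) = _
    rw [hitems, List.map_map]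
    rfl
  -- the max over the values list
  have hkeysne : PySem.Set.ofList arr ≠ [] := by
    obtain ⟨a, t, rfl⟩ := List.exists_cons_of_ne_nil h
    intro hempty
    have : a ∈ PySem.Set.ofList (a :: t) := (PySem.Set.mem_ofList _ _).mpr (by simp)
    rw [hempty] at this
    cases this
  have hvalsne : (PySem.Dict.counter arr).values ≠ [] := by
    rw [hvals]
    simpa using hkeysne
  obtain ⟨m, hm⟩ : ∃ m, PySem.List.max? (PySem.Dict.counter arr).values (fun x => x) = some m := by
    rcases hopt : PySem.List.max? (PySem.Dict.counter arr).values (fun x => x) with _ | m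
    · exact absurd ((PySem.List.max?_eq_none_iff _ _).mp hopt) hvalsne
    · exact ⟨m, rfl⟩
  have hmmem : m ∈ (PySem.Dict.counter arr).values := PySem.List.max?_mem hm
  have hmmax : ∀ y ∈ (PySem.Dict.counter arr).values, y ≤ m := by
    intro y hy
    exact PySem.List.max?_isMax hm y hy
  rw [hm]
  simp only [Option.getD_some]
  -- the candidate list is the keys whose count equals m
  have hcands : ((PySem.Dict.counter arr).items.filter (fun p => p.2 == m)).map (·.1) =
      (PySem.Set.ofList arr).filter (fun k => (arr.count k : Int) == m) := by
    rw [hitems, List.filter_map, List.map_map]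
    simp [Function.comp_def]
  rw [hcands]
  obtain ⟨k0, hk0mem, hk0⟩ : ∃ k0 ∈ PySem.Set.ofList arr, ((arr.count k0 : Int)) = m := by
    rw [hvals] at hmmem
    obtain ⟨k0, hk0, hk0m⟩ := List.mem_map.mp hmmem
    exact ⟨k0, hk0, hk0m⟩
  have hcandsne : (PySem.Set.ofList arr).filter (fun k => (arr.count k : Int) == m) ≠ [] := by
    intro hempty
    have : k0 ∈ (PySem.Set.ofList arr).filter (fun k => (arr.count k : Int) == m) :=
      List.mem_filter.mpr ⟨hk0mem, by simp [hk0]⟩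
    rw [hempty] at this
    cases this
  obtain ⟨r, hr⟩ : ∃ r, PySem.List.min? ((PySem.Set.ofList arr).filter
      (fun k => (arr.count k : Int) == m)) (fun x => x) = some r := by
    rcases hopt : PySem.List.min? ((PySem.Set.ofList arr).filter
        (fun k => (arr.count k : Int) == m)) (fun x => x) with _ | r
    · exact absurd ((PySem.List.min?_eq_none_iff _ _).mp hopt) hcandsne
    · exact ⟨r, rfl⟩
  rw [hr]
  simp only [Option.getD_some]
  have hrmem := PySem.List.min?_mem hr
  have hrfil := List.mem_filter.mp hrmem
  have hrarr : r ∈ arr := (PySem.Set.mem_ofList _ _).mp hrfil.1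
  have hrcount : (arr.count r : Int) = m := by
    have := hrfil.2
    simpa using this
  refine ⟨hrarr, ?_, ?_⟩
  · intro x hx
    have hxval : (arr.count x : Int) ∈ (PySem.Dict.counter arr).values := by
      rw [hvals]
      exact List.mem_map.mpr ⟨x, (PySem.Set.mem_ofList _ _).mpr hx, rfl⟩
    have := hmmax _ hxval
    rw [← hrcount] at this
    exact_mod_cast this
  · intro x hx hxc
    have hxfil : x ∈ (PySem.Set.ofList arr).filter (fun k => (arr.count k : Int) == m) :=
      List.mem_filter.mpr ⟨(PySem.Set.mem_ofList _ _).mpr hx, by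
        simp [hxc, hrcount]⟩
    exact PySem.List.min?_isMin hr x hxfil

-- invariant of B's fold: counts holds the prefix counts; (best_count, best_id) name the
-- smallest id of maximal count in the processed prefix
def BInv (p : List Int) (st : PySem.Dict Int Int × Int × Option Int) : Prop :=
  (∀ v : Int, st.1.getD v 0 = (p.count v : Int)) ∧
  ((p = [] ∧ st.2.1 = 0 ∧ st.2.2 = none) ∨
   (∃ r : Int, st.2.2 = some r ∧ r ∈ p ∧ st.2.1 = (p.count r : Int) ∧
     (∀ x ∈ p, p.count x ≤ p.count r) ∧ (∀ x ∈ p, p.count x = p.count r → r ≤ x)))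

theorem bInv_step (p : List Int) (b : Int) (st : PySem.Dict Int Int × Int × Option Int)
    (h : BInv p st) : BInv (p ++ [b]) (mbStep st b) := by
  obtain ⟨counts, bc, bid⟩ := st
  obtain ⟨hc, hbest⟩ := h
  dsimp only at hc hbest
  have hcb := hc b
  have hcount : ∀ v : Int, (p ++ [b]).count v = p.count v + (if v = b then 1 else 0) := by
    intro v
    rw [List.count_append]
    by_cases hv : v = b
    · subst hv; simp
    · simp [hv, List.count_eq_zero.mpr (by simp [hv] : v ∉ [b])]
  have hgetd : ∀ v : Int,
      (counts.insert b (counts.getD b 0 + 1)).getD v 0 = ((p ++ [b]).count v : Int) := by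
    intro v
    rw [PySem.Dict.getD_insert, hcount v]
    split_ifs with hv
    · subst hv; rw [hcb]; push_cast; ring
    · rw [hc v]; push_cast; ring
  unfold mbStep
  dsimp only
  by_cases hlt : bc < counts.getD b 0 + 1
  · -- b becomes the new best with count p.count b + 1
    rw [if_pos hlt]
    have hub : ∀ x ∈ p, p.count x ≤ p.count b := by
      intro x hx
      rcases hbest with ⟨rfl, -, -⟩ | ⟨r, -, -, hbc, hmax, -⟩
      · cases hx
      · have h1 := hmax x hx
        have h2 : (p.count r : Int) < counts.getD b 0 + 1 := hbc ▸ hlt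
        rw [hcb] at h2; omega
    refine ⟨hgetd, Or.inr ⟨b, rfl, by simp, ?_, ?_, ?_⟩⟩
    · rw [hcb, hcount b]; push_cast; simp
    · intro x hx
      by_cases hxeq : x = b
      · subst hxeq; exact le_refl _
      · have hx' : x ∈ p := by
          rcases List.mem_append.mp hx with h' | h'
          · exact h'
          · exact absurd (by simpa using h') hxeq
        have := hub x hx'
        rw [hcount x, hcount b]; simp [hxeq]; omega
    · intro x hx hxc
      by_cases hxeq : x = b
      · exact le_of_eq hxeq.symm
      · exfalso
        have hx' : x ∈ p := by
          rcases List.mem_append.mp hx with h' | h'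
          · exact h'
          · exact absurd (by simpa using h') hxeq
        rw [hcount x, hcount b] at hxc
        simp [hxeq] at hxc
        have := hub x hx'
        omega
  · rw [if_neg hlt]
    rcases hbest with ⟨rfl, hbc0, hbidn⟩ | ⟨r, hbid, hrm, hbc, hmax, hmin⟩
    · -- impossible: best_count = 0 < count b + 1
      exfalso
      simp at hcb
      exact hlt (by rw [hcb, hbc0]; norm_num)
    subst hbid
    have hlt' : p.count b + 1 ≤ p.count r := by
      have h' := not_lt.mp hlt
      rw [hcb, hbc] at h'
      exact_mod_cast h'
    have hrb : r ≠ b := fun hh => by rw [hh] at hlt'; omega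
    by_cases htie : (counts.getD b 0 + 1 == bc) = true ∧ b < r
    · -- tie with a smaller id: b becomes the best
      rw [if_pos (by simp [htie.1, htie.2])]
      have hcnteq : p.count b + 1 = p.count r := by
        have := eq_of_beq htie.1
        rw [hcb, hbc] at this
        exact_mod_cast this
      refine ⟨hgetd, Or.inr ⟨b, rfl, by simp, ?_, ?_, ?_⟩⟩
      · rw [hbc, hcount b]; push_cast; simp; omega
      · intro x hx
        by_cases hxeq : x = b
        · subst hxeq; exact le_refl _
        · have hx' : x ∈ p := by
            rcases List.mem_append.mp hx with h' | h'
            · exact h'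
            · exact absurd (by simpa using h') hxeq
          have := hmax x hx'
          rw [hcount x, hcount b]; simp [hxeq]; omega
      · intro x hx hxc
        by_cases hxeq : x = b
        · exact le_of_eq hxeq.symm
        · have hx' : x ∈ p := by
            rcases List.mem_append.mp hx with h' | h'
            · exact h'
            · exact absurd (by simpa using h') hxeq
          rw [hcount x, hcount b] at hxc
          simp [hxeq] at hxc
          have : p.count x = p.count r := by omega
          have := hmin x hx' this
          omega
    · -- keep the old best
      rw [if_neg (by
        simp only [Bool.and_eq_true, decide_eq_true_eq]
        intro hcc
        exact htie ⟨hcc.1, hcc.2⟩)]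
      refine ⟨hgetd, Or.inr ⟨r, rfl, List.mem_append_left _ hrm, ?_, ?_, ?_⟩⟩
      · rw [hbc, hcount r]; simp [hrb]
      · intro x hx
        by_cases hxeq : x = b
        · subst hxeq
          rw [hcount x, hcount r]; simp [hrb]; omega
        · have hx' : x ∈ p := by
            rcases List.mem_append.mp hx with h' | h'
            · exact h'
            · exact absurd (by simpa using h') hxeq
          have := hmax x hx'
          rw [hcount x, hcount r]; simp [hxeq, hrb]; omega
      · intro x hx hxc
        by_cases hxeq : x = b
        · subst hxeq
          rw [hcount x, hcount r] at hxc
          simp [hrb] at hxc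
          have hbceq : (counts.getD x 0 + 1 == bc) = true := by
            rw [hcb, hbc]
            simp
            omega
          have : ¬ x < r := fun hbr => htie ⟨hbceq, hbr⟩
          omega
        · have hx' : x ∈ p := by
            rcases List.mem_append.mp hx with h' | h'
            · exact h'
            · exact absurd (by simpa using h') hxeq
          rw [hcount x, hcount r] at hxc
          simp [hxeq, hrb] at hxc
          exact hmin x hx' hxc

theorem bInv_fold (l : List Int) (p : List Int) (st : PySem.Dict Int Int × Int × Option Int)
    (h : BInv p st) : BInv (p ++ l) (l.foldl mbStep st) := by
  induction l generalizing p st with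
  | nil => simpa using h
  | cons b t ih =>
      have := ih (p ++ [b]) (mbStep st b) (bInv_step p b st h)
      simpa using this

theorem migratoryBirds_alt_isAns (arr : List Int) (h : arr ≠ []) : IsAns arr (migratoryBirds_alt arr) := by
  have h0 : BInv [] ((PySem.Dict.empty : PySem.Dict Int Int), (0 : Int), (none : Option Int)) := by
    refine ⟨fun v => by simp [PySem.Dict.getD_empty], Or.inl ⟨rfl, rfl, rfl⟩⟩
  have hinv := bInv_fold arr [] _ h0
  simp only [List.nil_append] at hinv
  obtain ⟨-, hbest⟩ := hinv
  rcases hbest with ⟨he, -, -⟩ | ⟨r, hr, hmem, -, hmax, hmin⟩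
  · exact absurd he h
  · unfold migratoryBirds_alt
    simp only [hr, Option.getD_some]
    exact ⟨hmem, hmax, hmin⟩

-- ===== VERDICT (by name: the statement is the Claim_ definition above) =====
theorem migratoryBirds_spec : Claim_equal_migratoryBirds := by
  intro arr _ hpre
  exact isAns_unique (migratoryBirds_isAns arr hpre) (migratoryBirds_alt_isAns arr hpre)
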